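-- pv_equiv track=rewrite | github.com/DiegoLagosBesoain/Algoritms-and-Competitive_programing | Grafos_backtraking_binarysearch/zombie_swallows.py | backtrakint
-- ===== SOURCE A (Python) =====
-- def backtrakint(insectos,Cmax,Cmin,cadena_actual,indice):
--     if Cmin<=sum(cadena_actual)<=Cmax:
--         return True
--     if sum(cadena_actual)>Cmax:
--         return False
--     else:
--         for i in range(indice,len(insectos)):
--             cadena_actual.append(insectos[i])
--             if(backtrakint(insectos,Cmax,Cmin,cadena_actual,i+1)):
--                 return True
--             cadena_actual.pop()
--     return False
-- ===== SOURCE B (Python) =====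
-- def backtrakint(insectos, Cmax, Cmin, cadena_actual, indice):
--     s = sum(cadena_actual)
--     if Cmin <= s <= Cmax:
--         return True
--     if s > Cmax:
--         return False
--     elems = [insectos[i] for i in range(indice, len(insectos))]
--     sums = {s}
--     for x in elems:
--         new = set()
--         for t in sums:
--             u = t + x
--             if Cmin <= u <= Cmax:
--                 return True
--             if u <= Cmax:
--                 new.add(u)
--         sums |= new
--     return False
-- ===== Notes on version B (the rewrite author's own statement) =====
-- stated objective: alternative
-- what changed: Replaces the exponential depth-first backtracking recursion by an iterative left-to-right subset-sum DP that maintains the set of reachable partial sums pruned at Cmax and answers True when a sum enters [Cmin, Cmax]; exponentially faster when many subsets share a sum (small/duplicate values), slower when distinct sums proliferate.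
import Mathlib
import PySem

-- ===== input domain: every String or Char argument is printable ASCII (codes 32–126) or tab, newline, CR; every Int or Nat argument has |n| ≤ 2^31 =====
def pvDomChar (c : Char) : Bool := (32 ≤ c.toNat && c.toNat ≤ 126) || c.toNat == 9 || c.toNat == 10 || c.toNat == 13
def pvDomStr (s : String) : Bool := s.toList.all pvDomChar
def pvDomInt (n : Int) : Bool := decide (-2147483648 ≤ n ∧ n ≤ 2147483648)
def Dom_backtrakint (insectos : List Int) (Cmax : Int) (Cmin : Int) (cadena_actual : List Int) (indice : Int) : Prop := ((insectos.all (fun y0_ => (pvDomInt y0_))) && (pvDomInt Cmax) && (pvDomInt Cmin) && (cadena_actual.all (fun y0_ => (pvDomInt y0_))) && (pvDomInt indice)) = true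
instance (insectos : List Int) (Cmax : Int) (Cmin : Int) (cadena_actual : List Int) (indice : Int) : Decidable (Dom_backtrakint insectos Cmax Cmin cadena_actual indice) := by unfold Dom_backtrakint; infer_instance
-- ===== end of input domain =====

-- B replaces A's exponential depth-first backtracking by a left-to-right subset-sum DP over the
-- set of reachable partial sums ≤ Cmax (objective: alternative algorithm, same value). Return values only: A leaves the found
-- chain appended to cadena_actual when it returns True; B never mutates cadena_actual.

-- ===== PORT A =====
-- Literal port of A's recursion; insectos[i] is PySem.List.pyGetD (under Pre_ every fetched
-- index is in Python's (negative-wrapping) range, where pyGetD agrees with Python).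
def backtrakint (insectos : List Int) (Cmax : Int) (Cmin : Int) (cadena_actual : List Int) (indice : Int) : Bool :=
  if Cmin ≤ cadena_actual.sum ∧ cadena_actual.sum ≤ Cmax then true
  else if cadena_actual.sum > Cmax then false
  else
    (PySem.List.pyRange indice (insectos.length : Int) 1).attach.any
      (fun i => backtrakint insectos Cmax Cmin
        (cadena_actual ++ [PySem.List.pyGetD insectos i.1 0]) (i.1 + 1))
termination_by ((insectos.length : Int) - indice).toNat
decreasing_by
  have h := PySem.List.mem_pyRange_one.mp i.2
  omega

-- ===== PORT B =====
-- inner loop 'for t in sums: …' (early return True = none; otherwise the built set 'new')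
def altInner (Cmin Cmax x : Int) : List Int → PySem.Set Int → Option (PySem.Set Int)
  | [], new => some new
  | t :: ts, new =>
      if Cmin ≤ t + x ∧ t + x ≤ Cmax then none
      else if t + x ≤ Cmax then altInner Cmin Cmax x ts (PySem.Set.add new (t + x))
      else altInner Cmin Cmax x ts new

-- outer loop 'for x in elems: …'
def altOuter (Cmin Cmax : Int) : List Int → PySem.Set Int → Bool
  | [], _ => false
  | x :: xs, sums =>
      match altInner Cmin Cmax x sums PySem.Set.empty with
      | none => true
      | some new => altOuter Cmin Cmax xs (PySem.Set.update sums new)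

def backtrakint_alt (insectos : List Int) (Cmax : Int) (Cmin : Int) (cadena_actual : List Int) (indice : Int) : Bool :=
  if Cmin ≤ cadena_actual.sum ∧ cadena_actual.sum ≤ Cmax then true
  else if cadena_actual.sum > Cmax then false
  else
    altOuter Cmin Cmax
      ((PySem.List.pyRange indice (insectos.length : Int) 1).map
        (fun i => PySem.List.pyGetD insectos i 0))
      (PySem.Set.ofList [cadena_actual.sum])

-- ===== PRECONDITION & SPEC =====
-- Pre_ excludes exactly the inputs where Python A raises IndexError: indice < -len(insectos)
-- while sum(cadena_actual) < Cmin and ≤ Cmax, so the loop is entered and insectos[indice] is out of range.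
def Pre_backtrakint (insectos : List Int) (Cmax : Int) (Cmin : Int) (cadena_actual : List Int) (indice : Int) : Prop :=
  -(insectos.length : Int) ≤ indice ∨ Cmin ≤ cadena_actual.sum ∨ Cmax < cadena_actual.sum
instance (insectos : List Int) (Cmax : Int) (Cmin : Int) (cadena_actual : List Int) (indice : Int) : Decidable (Pre_backtrakint insectos Cmax Cmin cadena_actual indice) := by unfold Pre_backtrakint; infer_instance

def pvWitness_backtrakint : List Int × Int × Int × List Int × Int := ([1, 2, 5], 4, 3, [], 0)

def Spec_backtrakint (insectos : List Int) (Cmax : Int) (Cmin : Int) (cadena_actual : List Int) (indice : Int) (out : Bool) : Prop := out = backtrakint_alt insectos Cmax Cmin cadena_actual indice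
instance (insectos : List Int) (Cmax : Int) (Cmin : Int) (cadena_actual : List Int) (indice : Int) (out : Bool) : Decidable (Spec_backtrakint insectos Cmax Cmin cadena_actual indice out) := by unfold Spec_backtrakint; infer_instance

-- ===== CLAIM (what is proved, stated in full; the proofs are below) =====
def Claim_equal_backtrakint : Prop := ∀ (insectos : List Int) (Cmax : Int) (Cmin : Int) (cadena_actual : List Int) (indice : Int), Dom_backtrakint insectos Cmax Cmin cadena_actual indice → Pre_backtrakint insectos Cmax Cmin cadena_actual indice → Spec_backtrakint insectos Cmax Cmin cadena_actual indice (backtrakint insectos Cmax Cmin cadena_actual indice)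

-- ===== LEMMAS AND PROOFS =====

-- the common functional specification: a chain over the remaining elements whose running sum
-- stays ≤ Cmax and eventually lands in [Cmin, Cmax]
def pvSpec (Cmin Cmax s : Int) : List Int → Bool
  | [] => decide (Cmin ≤ s ∧ s ≤ Cmax)
  | x :: xs => decide (Cmin ≤ s ∧ s ≤ Cmax) ||
      (decide (s ≤ Cmax) && (pvSpec Cmin Cmax (s + x) xs || pvSpec Cmin Cmax s xs))

theorem pvSpec_inR {Cmin Cmax s : Int} (h : Cmin ≤ s ∧ s ≤ Cmax) (xs : List Int) :
    pvSpec Cmin Cmax s xs = true := by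
  cases xs <;> simp [pvSpec, h.1, h.2]

theorem pvSpec_gt {Cmin Cmax : Int} : ∀ (xs : List Int) {s : Int}, Cmax < s →
    pvSpec Cmin Cmax s xs = false := by
  intro xs
  induction xs with
  | nil => intro s h; simp [pvSpec]; omega
  | cons x xs ih => intro s h; simp [pvSpec]; omega

theorem any_attach_eq {α : Type} (l : List α) (g : α → Bool) :
    (l.attach.any (fun x => g x.1)) = l.any g := by
  induction l with
  | nil => rfl
  | cons a l ih =>
    simp only [List.attach_cons, List.any_cons, List.any_map, Function.comp_def]
    rw [ih]

theorem backtrakint_eq_spec (insectos : List Int) (Cmax Cmin : Int) :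
    ∀ (n : ℕ) (cadena : List Int) (indice : Int),
      ((insectos.length : Int) - indice).toNat ≤ n →
      backtrakint insectos Cmax Cmin cadena indice =
        pvSpec Cmin Cmax cadena.sum
          ((PySem.List.pyRange indice (insectos.length : Int) 1).map
            (fun i => PySem.List.pyGetD insectos i 0)) := by
  intro n
  induction n with
  | zero =>
    intro cadena indice hn
    have hge : (insectos.length : Int) ≤ indice := by omega
    rw [backtrakint, PySem.List.pyRange_one_eq_nil hge]
    by_cases h1 : Cmin ≤ cadena.sum ∧ cadena.sum ≤ Cmax
    · simp [h1, pvSpec]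
    · by_cases h2 : Cmax < cadena.sum <;> simp [h1, h2, pvSpec]
  | succ n ih =>
    intro cadena indice hn
    rw [backtrakint]
    by_cases h1 : Cmin ≤ cadena.sum ∧ cadena.sum ≤ Cmax
    · simp only [if_pos h1]; rw [pvSpec_inR h1]
    · by_cases h2 : Cmax < cadena.sum
      · simp only [if_neg h1, if_pos (show cadena.sum > Cmax from h2)]
        rw [pvSpec_gt _ h2]
      · simp only [if_neg h1, if_neg (show ¬ cadena.sum > Cmax from h2)]
        by_cases hlt : indice < (insectos.length : Int)
        · rw [PySem.List.pyRange_one_cons hlt]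
          rw [any_attach_eq (g := fun i => backtrakint insectos Cmax Cmin
            (cadena ++ [PySem.List.pyGetD insectos i 0]) (i + 1))]
          rw [List.any_cons, List.map_cons]
          have htail : (PySem.List.pyRange (indice + 1) (insectos.length : Int) 1).any
              (fun i => backtrakint insectos Cmax Cmin
                (cadena ++ [PySem.List.pyGetD insectos i 0]) (i + 1)) =
              backtrakint insectos Cmax Cmin cadena (indice + 1) := by
            rw [backtrakint]
            simp only [if_neg h1, if_neg (show ¬ cadena.sum > Cmax from h2)]
            rw [any_attach_eq (g := fun i => backtrakint insectos Cmax Cmin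
              (cadena ++ [PySem.List.pyGetD insectos i 0]) (i + 1))]
          rw [htail]
          rw [ih (cadena ++ [PySem.List.pyGetD insectos indice 0]) (indice + 1) (by omega)]
          rw [ih cadena (indice + 1) (by omega)]
          have hsum : (cadena ++ [PySem.List.pyGetD insectos indice 0]).sum =
              cadena.sum + PySem.List.pyGetD insectos indice 0 := by simp
          rw [hsum]
          simp [pvSpec, h1]
          omega
        · rw [PySem.List.pyRange_one_eq_nil (by omega)]
          simp [pvSpec, h1]

theorem mem_foldl_add {u : Int} : ∀ (xs : List Int) (S : PySem.Set Int),
    u ∈ xs.foldl PySem.Set.add S ↔ u ∈ S ∨ u ∈ xs := by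
  intro xs
  induction xs with
  | nil => simp
  | cons x xs ih =>
    intro S
    simp [List.foldl_cons, ih, PySem.Set.mem_add]
    tauto

theorem altInner_none_iff {Cmin Cmax x : Int} : ∀ (L : List Int) (acc : PySem.Set Int),
    altInner Cmin Cmax x L acc = none ↔ ∃ t ∈ L, Cmin ≤ t + x ∧ t + x ≤ Cmax := by
  intro L
  induction L with
  | nil => simp [altInner]
  | cons t ts ih =>
    intro acc
    rw [altInner]
    by_cases h : Cmin ≤ t + x ∧ t + x ≤ Cmax
    · simp [h]
    · rw [if_neg h]
      have hstep : ∀ acc', (altInner Cmin Cmax x ts acc' = none ↔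
          ∃ s ∈ t :: ts, Cmin ≤ s + x ∧ s + x ≤ Cmax) := by
        intro acc'
        rw [ih]
        constructor
        · rintro ⟨s, hs, hc⟩; exact ⟨s, List.mem_cons_of_mem _ hs, hc⟩
        · rintro ⟨s, hs, hc⟩
          rcases List.mem_cons.mp hs with rfl | hs
          · exact absurd hc h
          · exact ⟨s, hs, hc⟩
      by_cases h2 : t + x ≤ Cmax
      · rw [if_pos h2]; exact hstep _
      · rw [if_neg h2]; exact hstep _

theorem altInner_some {Cmin Cmax x : Int} : ∀ (L : List Int) (acc new : PySem.Set Int),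
    altInner Cmin Cmax x L acc = some new →
    (∀ t ∈ L, ¬(Cmin ≤ t + x ∧ t + x ≤ Cmax)) ∧
    (∀ u, u ∈ new ↔ u ∈ acc ∨ ∃ t ∈ L, t + x ≤ Cmax ∧ u = t + x) := by
  intro L
  induction L with
  | nil => intro acc new h; simp [altInner] at h; subst h; simp
  | cons t ts ih =>
    intro acc new h
    by_cases h1 : Cmin ≤ t + x ∧ t + x ≤ Cmax
    · simp [altInner, h1] at h
    · by_cases h2 : t + x ≤ Cmax
      · rw [altInner, if_neg h1, if_pos h2] at h
        obtain ⟨hall, hmem⟩ := ih _ _ h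
        refine ⟨?_, fun u => ?_⟩
        · intro t' ht'
          rcases List.mem_cons.mp ht' with rfl | ht'
          · exact h1
          · exact hall t' ht'
        rw [hmem u, PySem.Set.mem_add]
        constructor
        · rintro (⟨hu | rfl⟩ | ⟨s, hs, hsc, rfl⟩)
          · exact Or.inl hu
          · exact Or.inr ⟨t, by simp, h2, rfl⟩
          · exact Or.inr ⟨s, by simp [hs], hsc, rfl⟩
        · rintro (hu | ⟨s, hs, hsc, rfl⟩)
          · exact Or.inl (Or.inl hu)
          · rcases List.mem_cons.mp hs with rfl | hs
            · exact Or.inl (Or.inr rfl)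
            · exact Or.inr ⟨s, hs, hsc, rfl⟩
      · rw [altInner, if_neg h1, if_neg h2] at h
        obtain ⟨hall, hmem⟩ := ih _ _ h
        refine ⟨?_, fun u => ?_⟩
        · intro t' ht'
          rcases List.mem_cons.mp ht' with rfl | ht'
          · exact h1
          · exact hall t' ht'
        rw [hmem u]
        constructor
        · rintro (hu | ⟨s, hs, hsc, rfl⟩)
          · exact Or.inl hu
          · exact Or.inr ⟨s, by simp [hs], hsc, rfl⟩
        · rintro (hu | ⟨s, hs, hsc, rfl⟩)
          · exact Or.inl hu
          · rcases List.mem_cons.mp hs with rfl | hs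
            · exact absurd hsc h2
            · exact Or.inr ⟨s, hs, hsc, rfl⟩

theorem altOuter_eq {Cmin Cmax : Int} : ∀ (xs : List Int) (S : PySem.Set Int),
    (∀ t ∈ S, ¬(Cmin ≤ t ∧ t ≤ Cmax) ∧ t ≤ Cmax) →
    altOuter Cmin Cmax xs S = S.any (fun t => pvSpec Cmin Cmax t xs) := by
  intro xs
  induction xs with
  | nil =>
    intro S hinv
    rw [altOuter, eq_comm, List.any_eq_false]
    intro t ht
    simpa [pvSpec] using (hinv t ht).1
  | cons x xs ih =>
    intro S hinv
    rw [altOuter]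
    cases h : altInner Cmin Cmax x S PySem.Set.empty with
    | none =>
      obtain ⟨t, ht, hr⟩ := (altInner_none_iff S PySem.Set.empty).mp h
      rw [eq_comm, List.any_eq_true]
      refine ⟨t, ht, ?_⟩
      have := pvSpec_inR hr xs
      simp [pvSpec, this, (hinv t ht).2]
    | some new =>
      obtain ⟨hall, hmem⟩ := altInner_some S PySem.Set.empty _ h
      have hinv' : ∀ u ∈ PySem.Set.update S new, ¬(Cmin ≤ u ∧ u ≤ Cmax) ∧ u ≤ Cmax := by
        intro u hu
        rcases (mem_foldl_add new S).mp hu with hu | hu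
        · exact hinv u hu
        · rcases (hmem u).mp hu with h0 | ⟨t, ht, htc, rfl⟩
          · simp [PySem.Set.empty] at h0
          · exact ⟨hall t ht, htc⟩
      show altOuter Cmin Cmax xs (PySem.Set.update S new) = _
      rw [ih _ hinv']
      rw [Bool.eq_iff_iff, List.any_eq_true, List.any_eq_true]
      constructor
      · rintro ⟨u, hu, hspec⟩
        rcases (mem_foldl_add new S).mp hu with hu | hu
        · refine ⟨u, hu, ?_⟩
          simp [pvSpec, hspec, (hinv u hu).2]
        · rcases (hmem u).mp hu with h0 | ⟨t, ht, htc, rfl⟩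
          · simp [PySem.Set.empty] at h0
          · refine ⟨t, ht, ?_⟩
            simp [pvSpec, hspec, (hinv t ht).2]
      · rintro ⟨t, ht, hspec⟩
        obtain ⟨hnr, hle⟩ := hinv t ht
        rw [pvSpec] at hspec
        simp only [decide_eq_true_eq, Bool.or_eq_true, Bool.and_eq_true] at hspec
        rcases hspec with h0 | ⟨-, hor⟩
        · exact absurd h0 hnr
        · by_cases hx : pvSpec Cmin Cmax (t + x) xs = true
          · by_cases hc : t + x ≤ Cmax
            · refine ⟨t + x, (mem_foldl_add new S).mpr (Or.inr ((hmem _).mpr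
                (Or.inr ⟨t, ht, hc, rfl⟩))), hx⟩
            · rw [pvSpec_gt xs (by omega)] at hx; exact absurd hx (by simp)
          · have hs : pvSpec Cmin Cmax t xs = true := by
              rw [Bool.not_eq_true] at hx
              simpa [hx] using hor
            exact ⟨t, (mem_foldl_add new S).mpr (Or.inl ht), hs⟩

theorem alt_eq_spec (insectos : List Int) (Cmax Cmin : Int) (cadena : List Int) (indice : Int) :
    backtrakint_alt insectos Cmax Cmin cadena indice =
      pvSpec Cmin Cmax cadena.sum
        ((PySem.List.pyRange indice (insectos.length : Int) 1).map
          (fun i => PySem.List.pyGetD insectos i 0)) := by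
  rw [backtrakint_alt]
  by_cases h1 : Cmin ≤ cadena.sum ∧ cadena.sum ≤ Cmax
  · simp only [if_pos h1]; rw [pvSpec_inR h1]
  · by_cases h2 : Cmax < cadena.sum
    · simp only [if_neg h1, if_pos (show cadena.sum > Cmax from h2)]
      rw [pvSpec_gt _ h2]
    · simp only [if_neg h1, if_neg (show ¬ cadena.sum > Cmax from h2)]
      have hinv : ∀ t ∈ PySem.Set.ofList [cadena.sum],
          ¬(Cmin ≤ t ∧ t ≤ Cmax) ∧ t ≤ Cmax := by
        intro t ht
        have : t = cadena.sum := by simpa [PySem.Set.ofList] using ht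
        subst this
        exact ⟨h1, by omega⟩
      rw [altOuter_eq _ _ hinv]
      show ([cadena.sum].any _) = _
      simp

-- ===== VERDICT (by name: the statement is the Claim_ definition above) =====
theorem backtrakint_spec : Claim_equal_backtrakint := by
  intro insectos Cmax Cmin cadena indice _ _
  unfold Spec_backtrakint
  rw [alt_eq_spec]
  exact backtrakint_eq_spec insectos Cmax Cmin _ cadena indice le_rfl
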